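-- pv_equiv track=rewrite | github.com/openefaadmin/openefa-installer | openefa-files/modules/phishing_detector.py | _determine_phishing_type
-- ===== SOURCE A (Python) =====
-- from typing import Dict, List, Optional
--
-- def _determine_phishing_type(indicators: List[str]) -> str:
--     """Determine the primary type of phishing based on indicators"""
--     if any("document_sharing" in ind for ind in indicators):
--         return "document_sharing_scam"
--     elif any("credential_harvesting" in ind for ind in indicators):
--         return "credential_harvesting"
--     elif any("inappropriate_sender" in ind for ind in indicators):
--         return "sender_impersonation"
--     elif any("mismatch" in ind for ind in indicators):
--         return "identity_spoofing"
--     else: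
--         return "general_phishing"
-- ===== SOURCE B (Python) =====
-- def _determine_phishing_type(indicators):
--     """Single gather pass over indicators collecting which marker substrings occur,
--     then one priority decision over the collected set."""
--     markers = ("document_sharing", "credential_harvesting", "inappropriate_sender", "mismatch")
--     found = set()
--     for ind in indicators:
--         for m in markers:
--             if m in ind:
--                 found.add(m)
--     if "document_sharing" in found:
--         return "document_sharing_scam"
--     if "credential_harvesting" in found:
--         return "credential_harvesting"
--     if "inappropriate_sender" in found:
--         return "sender_impersonation"
--     if "mismatch" in found:
--         return "identity_spoofing"
--     return "general_phishing"
-- ===== Notes on version B (the rewrite author's own statement) =====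
-- stated objective: alternative
-- what changed: Replaces four short-circuiting whole-list any() scans with a single gather pass that records which of the four marker substrings occur in any indicator, followed by one priority decision over the collected set.
import Mathlib
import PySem

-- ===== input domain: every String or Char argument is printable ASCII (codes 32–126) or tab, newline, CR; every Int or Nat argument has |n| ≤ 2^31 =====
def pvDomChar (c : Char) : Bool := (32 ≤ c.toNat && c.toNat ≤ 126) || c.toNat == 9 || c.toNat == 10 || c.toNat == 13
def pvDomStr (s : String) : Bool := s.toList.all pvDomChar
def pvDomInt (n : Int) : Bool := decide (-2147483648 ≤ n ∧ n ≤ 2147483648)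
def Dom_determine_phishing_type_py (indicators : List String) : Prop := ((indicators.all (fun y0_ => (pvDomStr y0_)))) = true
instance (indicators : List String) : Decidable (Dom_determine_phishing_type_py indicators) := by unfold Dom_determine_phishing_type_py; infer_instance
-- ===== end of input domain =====

-- B replaces A's four short-circuiting whole-list scans with one gather pass over the
-- indicators collecting the marker substrings found, then a priority decision on that set.


-- ===== PORT A =====
def determine_phishing_type_py (indicators : List String) : String :=
  if indicators.any (fun ind => PySem.Str.isIn "document_sharing" ind) then
    "document_sharing_scam"
  else if indicators.any (fun ind => PySem.Str.isIn "credential_harvesting" ind) then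
    "credential_harvesting"
  else if indicators.any (fun ind => PySem.Str.isIn "inappropriate_sender" ind) then
    "sender_impersonation"
  else if indicators.any (fun ind => PySem.Str.isIn "mismatch" ind) then
    "identity_spoofing"
  else
    "general_phishing"

-- ===== PORT B =====
def dpMarkers : List String :=
  ["document_sharing", "credential_harvesting", "inappropriate_sender", "mismatch"]

def determine_phishing_type_py_alt (indicators : List String) : String :=
  let found : PySem.Set String :=
    indicators.foldl (fun s ind =>
      dpMarkers.foldl (fun s m => if PySem.Str.isIn m ind then PySem.Set.add s m else s) s)
      PySem.Set.empty
  if PySem.Set.contains found "document_sharing" then "document_sharing_scam"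
  else if PySem.Set.contains found "credential_harvesting" then "credential_harvesting"
  else if PySem.Set.contains found "inappropriate_sender" then "sender_impersonation"
  else if PySem.Set.contains found "mismatch" then "identity_spoofing"
  else "general_phishing"

-- ===== PRECONDITION & SPEC =====
def Spec_determine_phishing_type_py (indicators : List String) (out : String) : Prop := out = determine_phishing_type_py_alt indicators
instance (indicators : List String) (out : String) : Decidable (Spec_determine_phishing_type_py indicators out) := by unfold Spec_determine_phishing_type_py; infer_instance

-- ===== CLAIM (what is proved, stated in full; the proofs are below) =====
def Claim_equal_determine_phishing_type_py : Prop := ∀ (indicators : List String), Dom_determine_phishing_type_py indicators → Spec_determine_phishing_type_py indicators (determine_phishing_type_py indicators)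

-- ===== LEMMAS AND PROOFS =====

-- membership in the inner gather over the marker list
lemma mem_inner (ms : List String) (s : PySem.Set String) (ind q : String) :
    q ∈ ms.foldl (fun s m => if PySem.Str.isIn m ind then PySem.Set.add s m else s) s ↔
      q ∈ s ∨ (q ∈ ms ∧ PySem.Str.isIn q ind = true) := by
  induction ms generalizing s with
  | nil => simp
  | cons m ms ih =>
    simp only [List.foldl_cons, ih, List.mem_cons]
    split_ifs with h
    · simp only [PySem.Set.mem_add]
      constructor
      · rintro ((hs | rfl) | ⟨hm, hi⟩)
        · exact Or.inl hs
        · exact Or.inr ⟨Or.inl rfl, h⟩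
        · exact Or.inr ⟨Or.inr hm, hi⟩
      · rintro (hs | ⟨(rfl | hm), hi⟩)
        · exact Or.inl (Or.inl hs)
        · exact Or.inl (Or.inr rfl)
        · exact Or.inr ⟨hm, hi⟩
    · constructor
      · rintro (hs | ⟨hm, hi⟩)
        · exact Or.inl hs
        · exact Or.inr ⟨Or.inr hm, hi⟩
      · rintro (hs | ⟨(rfl | hm), hi⟩)
        · exact Or.inl hs
        · exact absurd hi (by simpa using h)
        · exact Or.inr ⟨hm, hi⟩

-- membership in the whole gather pass
lemma mem_gather (xs : List String) (s : PySem.Set String) (q : String) :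
    q ∈ xs.foldl (fun s ind =>
        dpMarkers.foldl (fun s m => if PySem.Str.isIn m ind then PySem.Set.add s m else s) s) s ↔
      q ∈ s ∨ (q ∈ dpMarkers ∧ xs.any (fun ind => PySem.Str.isIn q ind) = true) := by
  induction xs generalizing s with
  | nil => simp only [List.foldl_nil, List.any_nil]; tauto
  | cons x xs ih =>
    simp only [List.foldl_cons, ih, mem_inner, List.any_cons, Bool.or_eq_true]
    tauto

-- the collected set answers each of the four marker queries exactly like A's scans
lemma contains_gather (xs : List String) (q : String) (hq : q ∈ dpMarkers) :
    PySem.Set.contains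
      (xs.foldl (fun s ind =>
        dpMarkers.foldl (fun s m => if PySem.Str.isIn m ind then PySem.Set.add s m else s) s)
        PySem.Set.empty) q = xs.any (fun ind => PySem.Str.isIn q ind) := by
  rcases h : xs.any (fun ind => PySem.Str.isIn q ind) with _ | _
  · rw [← Bool.not_eq_true]
    intro hc
    rw [PySem.Set.contains_iff, mem_gather] at hc
    rcases hc with hc | ⟨_, hc⟩
    · simp [PySem.Set.empty] at hc
    · rw [h] at hc; exact Bool.false_ne_true hc
  · rw [PySem.Set.contains_iff, mem_gather]
    exact Or.inr ⟨hq, h⟩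

-- ===== VERDICT (by name: the statement is the Claim_ definition above) =====
theorem determine_phishing_type_py_spec : Claim_equal_determine_phishing_type_py := by
  intro indicators _
  unfold Spec_determine_phishing_type_py determine_phishing_type_py determine_phishing_type_py_alt
  simp only [contains_gather indicators "document_sharing" (by decide),
    contains_gather indicators "credential_harvesting" (by decide),
    contains_gather indicators "inappropriate_sender" (by decide),
    contains_gather indicators "mismatch" (by decide)]
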